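-- pv_equiv track=rewrite | github.com/YuxuanZhang588/Python-HW | Quizzes/quiz_6.py | min_tiles_to_change
-- ===== SOURCE A (Python) =====
-- def min_tiles_to_change(room):
--     """
--     Returns the minimal number of tiles that need to be changed to make the
--     given room as colorful as possible.
--
--     The goal is to achieve a tile configuration where no two adjacent tiles are
--     the same color.
--
--     Parameters:
--         room - a string containing the colors of the tiles in the room. The i^th
--                character of room (one of 'R', 'G', 'B', or 'Y') is the color of
--                the i^th tile.
--
--     Returns:
--         The minimum number of tiles that need to be changed so that no two
--         neighboring tiles are the same color.
--
--     Pseudocode: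
--         I found that the minimum number of tiles needs to change is related
--         to the number of consecutive same colored tiles. For example, if there
--         are five red tiles placed together: "RRRRR", then the minimum number of
--         tiles need to be changed is int(5/2). Based on this, I use for-loop to
--         count the number of tiles that have the same number placed together and
--         add these number in a list. Then I divide them by two and round them down.
--         Then I add them together, which gives me the nimimum number of tiles that
--         needs to be changed.
--
--     """
--
--
--     # COMPLETE ME!
--     lst = list(room)
--     same = []
--     count = 0
--     num_change = 0
--     lst_num = []
--     for i in range(len(lst)-1):
--         if lst[i] == lst[i+1]:
--             count+=1
--         else:
--             count+=1
--             lst_num.append(count)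
--             count=0
--     count += 1
--     lst_num.append(count)
--     for i in lst_num:
--         num_change += int(i/2)
--     return num_change
-- ===== SOURCE B (Python) =====
-- def min_tiles_to_change(room):
--     changes = 0
--     last = None
--     for tile in room:
--         if tile == last:
--             changes += 1
--             last = None
--         else:
--             last = tile
--     return changes
-- ===== Notes on version B (the rewrite author's own statement) =====
-- stated objective: simpler
-- what changed: Replaces the run-length-table pass (build a list of run lengths, then sum floor(run/2)) with a single greedy pass that tracks the last kept tile (None after a change) and counts collisions directly, with no intermediate list.
import Mathlib
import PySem

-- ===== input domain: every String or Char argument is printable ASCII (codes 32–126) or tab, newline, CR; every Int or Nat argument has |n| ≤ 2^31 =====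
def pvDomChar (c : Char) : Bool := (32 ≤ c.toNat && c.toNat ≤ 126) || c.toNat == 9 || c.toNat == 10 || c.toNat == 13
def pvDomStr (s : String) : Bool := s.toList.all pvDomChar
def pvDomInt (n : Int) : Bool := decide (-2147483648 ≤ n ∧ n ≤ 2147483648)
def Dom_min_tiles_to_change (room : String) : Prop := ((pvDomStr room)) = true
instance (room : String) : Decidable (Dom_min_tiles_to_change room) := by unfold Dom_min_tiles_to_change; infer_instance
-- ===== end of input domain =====

-- B replaces A's run-length table (sum of floor(run/2)) by one greedy pass tracking the
-- last kept tile; equal return value, no speed claim (both are one linear scan).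

-- ===== PORT A =====
-- the index loop 'for i in range(len(lst)-1): compare lst[i], lst[i+1]' as the obvious
-- structural recursion over adjacent pairs, with the same (count, lst_num) state
def pvLoopA : List Char → Int → List Int → Int × List Int
  | a :: b :: rest, count, lst_num =>
      if a == b then pvLoopA (b :: rest) (count + 1) lst_num
      else pvLoopA (b :: rest) 0 (lst_num ++ [count + 1])
  | _, count, lst_num => (count, lst_num)

def min_tiles_to_change (room : String) : Int :=
  let lst := room.toList
  let r := pvLoopA lst 0 []
  let lst_num := r.2 ++ [r.1 + 1]
  -- int(i/2): every i here is ≥ 1, where Python's truncation equals Lean's Int division (exact)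
  lst_num.foldl (fun num_change i => num_change + i / 2) 0

-- ===== PORT B =====
def pvLoopB : List Char → Option Char → Int → Int
  | [], _, changes => changes
  | tile :: rest, last, changes =>
      if some tile == last then pvLoopB rest none (changes + 1)
      else pvLoopB rest (some tile) changes

def min_tiles_to_change_alt (room : String) : Int :=
  pvLoopB room.toList none 0

-- ===== PRECONDITION & SPEC =====
def Spec_min_tiles_to_change (room : String) (out : Int) : Prop := out = min_tiles_to_change_alt room
instance (room : String) (out : Int) : Decidable (Spec_min_tiles_to_change room out) := by unfold Spec_min_tiles_to_change; infer_instance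

-- ===== CLAIM (what is proved, stated in full; the proofs are below) =====
def Claim_equal_min_tiles_to_change : Prop := ∀ (room : String), Dom_min_tiles_to_change room → Spec_min_tiles_to_change room (min_tiles_to_change room)

-- ===== LEMMAS AND PROOFS =====

-- sum of i/2 over a run-length list, with seed shifted out
theorem pvFoldl_div2_shift (l : List Int) (s : Int) :
    l.foldl (fun n i => n + i / 2) s = s + l.foldl (fun n i => n + i / 2) 0 := by
  induction l generalizing s with
  | nil => simp
  | cons x xs ih =>
      simp only [List.foldl_cons]
      rw [ih, ih (0 + x / 2)]; ring

-- the accumulator of pvLoopA only ever grows at the end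
theorem pvLoopA_acc (l : List Char) (c : Int) (acc : List Int) :
    pvLoopA l c acc = ((pvLoopA l c []).1, acc ++ (pvLoopA l c []).2) := by
  induction l generalizing c acc with
  | nil => simp [pvLoopA]
  | cons a t ih =>
      cases t with
      | nil => simp [pvLoopA]
      | cons b rest =>
          simp only [pvLoopA]
          by_cases h : (a == b) = true
          · rw [if_pos h, if_pos h]; exact ih ..
          · rw [if_neg h, if_neg h, ih 0 (acc ++ [c + 1]), ih 0 ([] ++ [c + 1])]
            simp

-- accumulated changes of pvLoopB, seed shifted out
theorem pvLoopB_shift (l : List Char) (o : Option Char) (s : Int) :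
    pvLoopB l o s = s + pvLoopB l o 0 := by
  induction l generalizing o s with
  | nil => simp [pvLoopB]
  | cons a t ih =>
      simp only [pvLoopB]
      by_cases h : (some a == o) = true
      · rw [if_pos h, if_pos h, ih none (s + 1), ih none (0 + 1)]; ring
      · rw [if_neg h, if_neg h]; exact ih ..

-- finalize A's state: remaining count closes the current run
def pvFinA (l : List Char) (a : Char) (c : Int) : Int :=
  let r := pvLoopA (a :: l) c []
  (r.2 ++ [r.1 + 1]).foldl (fun n i => n + i / 2) 0

-- invariant: mid-run with c equal pairs consumed, B holds last = a if c even, none if c odd,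
-- and has already counted (c+1)/2 changes in the current run
theorem pvMain (l : List Char) (a : Char) (c : Int) (hc : 0 ≤ c) :
    pvFinA l a c = (c + 1) / 2 + pvLoopB l (if c % 2 = 0 then some a else none) 0 := by
  induction l generalizing a c with
  | nil => simp [pvFinA, pvLoopA, pvLoopB]
  | cons b rest ih =>
      by_cases hab : (a == b) = true
      · have hab' : a = b := by simpa using hab
        subst hab'
        have hA : pvFinA (a :: rest) a c = pvFinA rest a (c + 1) := by
          simp [pvFinA, pvLoopA]
        rw [hA, ih a (c + 1) (by omega)]
        simp only [pvLoopB]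
        rcases Int.emod_two_eq_zero_or_one c with h | h
        · rw [if_neg (show ¬ (c + 1) % 2 = 0 by omega), if_pos h,
              if_pos (show (some a == some a) = true by simp),
              pvLoopB_shift rest none (0 + 1)]
          generalize pvLoopB rest none 0 = X
          omega
        · rw [if_pos (show (c + 1) % 2 = 0 by omega), if_neg (show ¬ c % 2 = 0 by omega),
              if_neg (show ¬ ((some a == (none : Option Char)) = true) by simp)]
          generalize pvLoopB rest (some a) 0 = X
          omega
      · have hA : pvFinA (b :: rest) a c = (c + 1) / 2 + pvFinA rest b 0 := by
          simp only [pvFinA, pvLoopA]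
          rw [if_neg hab]
          simp only [List.nil_append]
          rw [pvLoopA_acc (b :: rest) 0 [c + 1]]
          simp only [List.cons_append, List.nil_append, List.foldl_cons]
          rw [pvFoldl_div2_shift]
          omega
        rw [hA, ih b 0 (le_refl 0)]
        simp only [pvLoopB]
        have hb : ¬ (some b == (if c % 2 = 0 then some a else none)) = true := by
          split
          · intro hba
            have hba' : b = a := by simpa using hba
            exact hab (by simp [hba'])
          · simp
        rw [if_neg hb, if_pos (show (0 : Int) % 2 = 0 from rfl)]
        generalize pvLoopB rest (some b) 0 = X
        omega

-- ===== VERDICT (by name: the statement is the Claim_ definition above) =====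
theorem min_tiles_to_change_spec : Claim_equal_min_tiles_to_change := by
  intro room _
  unfold Spec_min_tiles_to_change min_tiles_to_change min_tiles_to_change_alt
  cases hl : room.toList with
  | nil => simp [pvLoopA, pvLoopB]
  | cons a t =>
      have := pvMain t a 0 (le_refl 0)
      simp only [pvFinA] at this
      simp only [this]
      simp [pvLoopB]
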